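-- pv_equiv track=rewrite | github.com/natimmansilla/GuiaEjerciciosProgramacion-AED | Guia 17/G17-Ej02.py | buscar_mayor
-- ===== SOURCE A (Python) =====
-- def buscar_mayor(v):
--     mayor = v[0]
--     repeticiones = 1
--     for i in range(1,len(v)):
--         if v[i] > mayor:
--             mayor = v[i]
--             repeticiones = 1
--         elif v[i] == mayor:
--             repeticiones += 1
--     return mayor, repeticiones
-- ===== SOURCE B (Python) =====
-- def buscar_mayor(v):
--     mayor = max(v)
--     return mayor, v.count(mayor)
-- ===== Notes on version B (the rewrite author's own statement) =====
-- stated objective: idiomatic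
-- what changed: Replaces the single hand-written running-max/counter loop with two library passes: max(v) then v.count(mayor).
import Mathlib
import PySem

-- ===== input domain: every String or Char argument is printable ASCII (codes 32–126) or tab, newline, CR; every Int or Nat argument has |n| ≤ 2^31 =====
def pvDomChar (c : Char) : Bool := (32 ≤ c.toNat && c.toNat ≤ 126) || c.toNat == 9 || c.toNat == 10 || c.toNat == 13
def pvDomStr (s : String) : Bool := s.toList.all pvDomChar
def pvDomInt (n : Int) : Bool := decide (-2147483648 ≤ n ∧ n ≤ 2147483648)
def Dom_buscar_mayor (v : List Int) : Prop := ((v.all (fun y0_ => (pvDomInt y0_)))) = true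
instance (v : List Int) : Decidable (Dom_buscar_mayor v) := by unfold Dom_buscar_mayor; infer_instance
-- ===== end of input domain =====

-- B replaces A's single running-max/counter loop with two library passes (max, then count); objective: idiomatic.


-- ===== PORT A =====
-- mayor = v[0]; repeticiones = 1; loop over the remaining elements updating (mayor, repeticiones).
-- (the [] branch is unreachable under Pre_: Python A raises IndexError there)
def buscar_mayor (v : List Int) : Int × Int :=
  match v with
  | [] => (0, 0)
  | h :: t =>
    t.foldl (fun p x =>
      if x > p.1 then (x, 1)
      else if x = p.1 then (p.1, p.2 + 1)
      else p) (h, 1)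

-- ===== PORT B =====
-- mayor = max(v); return mayor, v.count(mayor)
def buscar_mayor_alt (v : List Int) : Int × Int :=
  match PySem.List.max? v (fun x => x) with
  | some m => (m, (PySem.List.count v m : Int))
  | none => (0, 0)

-- ===== PRECONDITION & SPEC =====
-- Pre_ excludes exactly the empty list, on which Python A raises IndexError.
def Pre_buscar_mayor (v : List Int) : Prop := v ≠ []
instance (v : List Int) : Decidable (Pre_buscar_mayor v) := by unfold Pre_buscar_mayor; infer_instance
def pvWitness_buscar_mayor : List Int := [3, 7, 7, 2]
def Spec_buscar_mayor (v : List Int) (out : Int × Int) : Prop := out = buscar_mayor_alt v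
instance (v : List Int) (out : Int × Int) : Decidable (Spec_buscar_mayor v out) := by unfold Spec_buscar_mayor; infer_instance

-- ===== CLAIM (what is proved, stated in full; the proofs are below) =====
def Claim_equal_buscar_mayor : Prop := ∀ (v : List Int), Dom_buscar_mayor v → Pre_buscar_mayor v → Spec_buscar_mayor v (buscar_mayor v)

-- ===== LEMMAS AND PROOFS =====

-- Loop invariant for A's fold: the result is the running max together with
-- (seed count if the max never moved, else 0) plus the occurrences of the max in the tail.
theorem buscar_mayor_loop (l : List Int) (m c : Int) :
    l.foldl (fun p x =>
      if x > p.1 then (x, 1)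
      else if x = p.1 then (p.1, p.2 + 1)
      else p) (m, c)
    = (l.foldl max m,
       (if l.foldl max m = m then c else 0) + (l.count (l.foldl max m) : Int)) := by
  induction l generalizing m c with
  | nil => simp
  | cons x t ih =>
    simp only [List.foldl_cons, List.count_cons]
    by_cases hx : x > m
    · have hmax : max m x = x := by omega
      rw [if_pos hx, ih x 1]
      simp only [hmax]
      have hMx : x ≤ t.foldl max x := (PySem.List.le_foldl_max _ _).1
      have hMne : t.foldl max x ≠ m := by omega
      rw [if_neg hMne]
      by_cases hxe : x = t.foldl max x
      · rw [if_pos hxe.symm]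
        simp [← hxe]
        ring
      · rw [if_neg (fun h : t.foldl max x = x => hxe h.symm)]
        have : ¬ ((x == t.foldl max x) = true) := by simp [hxe]
        rw [if_neg this]
        simp
    · rw [if_neg hx]
      have hmax : max m x = m := by omega
      by_cases hxe : x = m
      · rw [if_pos hxe, ih m (c + 1)]
        simp only [hmax]
        have hMm : m ≤ t.foldl max m := (PySem.List.le_foldl_max _ _).1
        by_cases hM : t.foldl max m = m
        · rw [if_pos hM, if_pos hM, if_pos (show (x == t.foldl max m) = true by rw [beq_iff_eq]; omega)]
          push_cast; ring
        · rw [if_neg hM, if_neg hM]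
          have : ¬ (x == t.foldl max m) := by simp; omega
          rw [if_neg this]
          push_cast; ring
      · rw [if_neg hxe, ih m c]
        simp only [hmax]
        have hMm : m ≤ t.foldl max m := (PySem.List.le_foldl_max _ _).1
        have : ¬ (x == t.foldl max m) := by
          simp only [beq_iff_eq]
          intro h; omega
        rw [if_neg this]
        push_cast; ring

-- ===== VERDICT (by name: the statement is the Claim_ definition above) =====
theorem buscar_mayor_spec : Claim_equal_buscar_mayor := by
  intro v _ hpre
  unfold Spec_buscar_mayor
  match v with
  | [] => exact absurd rfl hpre
  | h :: t =>
    unfold buscar_mayor buscar_mayor_alt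
    rw [PySem.List.max?_id_cons]
    simp only [PySem.List.count_eq]
    rw [buscar_mayor_loop]
    have hMh : h ≤ t.foldl max h := (PySem.List.le_foldl_max _ _).1
    simp only [List.count_cons]
    by_cases hM : t.foldl max h = h
    · rw [if_pos hM]
      rw [if_pos (by simp [hM] : h == t.foldl max h)]
      push_cast; ring
    · rw [if_neg hM]
      have : ¬ (h == t.foldl max h) := by simp; exact fun h' => hM h'.symm
      rw [if_neg this]
      push_cast; ring
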